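-- pv_equiv track=rewrite | github.com/justinnguyendsa/fl_tokenizer | configs.py | bundle_listing
-- ===== SOURCE A (Python) =====
-- def shingle(ls, num):
--   result = []
--   for i in range(len(ls) - num + 1):
--     result.append(' '.join(ls[i:i + num]))
--   return result
--
-- def bundle_listing(conv_ls):
--   bundle_ls = []
--   for conv in conv_ls:
--     for sen in conv:
--       word_ls = sen.split()
--       for i in range(4):
--         i += 1
--         bundle_ls.extend(shingle(word_ls, i))
--   return bundle_ls
-- ===== SOURCE B (Python) =====
-- def bundle_listing(conv_ls):
--     bundle_ls = []
--     for conv in conv_ls: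
--         for sen in conv:
--             words = sen.split()
--             prev = words
--             bundle_ls.extend(prev)
--             for n in range(2, 5):
--                 prev = [' '.join((prev[i], words[i + n - 1]))
--                         for i in range(len(words) - n + 1)]
--                 bundle_ls.extend(prev)
--     return bundle_ls
-- ===== Notes on version B (the rewrite author's own statement) =====
-- stated objective: alternative
-- what changed: B derives each shingle level n from the stored previous level (prev[i] joined with the one word that extends the window) instead of re-slicing and re-joining every window of every length from scratch.
import Mathlib
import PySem

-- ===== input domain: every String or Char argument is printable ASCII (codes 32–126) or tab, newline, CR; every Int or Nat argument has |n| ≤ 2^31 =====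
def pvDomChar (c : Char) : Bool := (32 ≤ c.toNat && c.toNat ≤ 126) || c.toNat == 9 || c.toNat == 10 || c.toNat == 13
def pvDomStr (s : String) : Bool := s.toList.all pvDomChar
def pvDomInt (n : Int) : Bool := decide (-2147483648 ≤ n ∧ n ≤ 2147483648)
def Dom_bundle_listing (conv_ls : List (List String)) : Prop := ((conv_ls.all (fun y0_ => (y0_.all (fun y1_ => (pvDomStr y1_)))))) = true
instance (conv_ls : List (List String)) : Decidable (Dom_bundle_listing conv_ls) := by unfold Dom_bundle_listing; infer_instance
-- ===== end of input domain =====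

-- B builds each shingle level from the previous level (prev[i] joined with the word that
-- extends the window) instead of re-slicing and re-joining every window from scratch;
-- objective: alternative decomposition, same output.

-- ===== PORT A =====
-- shingle(ls, num): every window of length num, joined from a fresh slice
def shingleA (ls : List String) (num : Int) : List String :=
  (PySem.List.pyRange 0 ((ls.length : Int) - num + 1) 1).foldl
    (fun result i => result ++ [PySem.Str.join " " (PySem.List.slice ls (some i) (some (i + num)))]) []

def bundle_listing (conv_ls : List (List String)) : List String :=
  conv_ls.foldl (fun bundle_ls conv =>
    conv.foldl (fun bundle_ls sen =>
      let word_ls := PySem.Str.split₀ sen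
      (PySem.List.pyRange 0 4 1).foldl
        (fun b i => b ++ shingleA word_ls (i + 1)) bundle_ls) bundle_ls) []

-- ===== PORT B =====
-- next level n from level n-1: ' '.join((prev[i], words[i+n-1])) for each window start i
def nextLevel (words prev : List String) (n : Int) : List String :=
  (PySem.List.pyRange 0 ((words.length : Int) - n + 1) 1).map
    (fun i => PySem.Str.join " " [PySem.List.pyGetD prev i "", PySem.List.pyGetD words (i + n - 1) ""])

def bundle_listing_alt (conv_ls : List (List String)) : List String :=
  conv_ls.foldl (fun bundle_ls conv =>
    conv.foldl (fun bundle_ls sen =>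
      let words := PySem.Str.split₀ sen
      ((PySem.List.pyRange 2 5 1).foldl
          (fun (st : List String × List String) n =>
            let cur := nextLevel words st.1 n
            (cur, st.2 ++ cur))
          (words, bundle_ls ++ words)).2) bundle_ls) []

-- ===== PRECONDITION & SPEC =====
def Spec_bundle_listing (conv_ls : List (List String)) (out : List String) : Prop := out = bundle_listing_alt conv_ls
instance (conv_ls : List (List String)) (out : List String) : Decidable (Spec_bundle_listing conv_ls out) := by unfold Spec_bundle_listing; infer_instance

-- ===== CLAIM (what is proved, stated in full; the proofs are below) =====
def Claim_equal_bundle_listing : Prop := ∀ (conv_ls : List (List String)), Dom_bundle_listing conv_ls → Spec_bundle_listing conv_ls (bundle_listing conv_ls)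

-- ===== LEMMAS AND PROOFS =====

-- canonical form of a shingle level: all windows of length m, joined
def lvl (ws : List String) (m : Nat) : List String :=
  (List.range (ws.length + 1 - m)).map (fun i => PySem.Str.join " " ((ws.drop i).take m))

theorem shingleA_eq_lvl (ws : List String) (m : Nat) : shingleA ws (m : Int) = lvl ws m := by
  unfold shingleA lvl
  rw [PySem.List.foldl_append_singleton_eq_map, PySem.List.pyRange_one]
  have hlen : (((ws.length:Int) - m + 1) - 0).toNat = ws.length + 1 - m := by omega
  rw [hlen, List.map_map, List.nil_append]
  apply List.map_congr_left
  intro k hk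
  simp only [Function.comp, zero_add]
  rw [PySem.List.slice_toNat _ (by positivity) (by positivity)]
  congr 1
  have : ((k:Int) + m).toNat = k + m := by omega
  simp [this]

theorem str_join_singleton (x : String) : PySem.Str.join " " [x] = x := by
  apply String.toList_inj.mp
  rw [PySem.Str.toList_join]
  simp [PySem.Chars.join_singleton]

theorem lvl_one (ws : List String) : lvl ws 1 = ws := by
  unfold lvl
  apply List.ext_getElem
  · simp
  · intro i h1 h2
    simp only [List.getElem_map, List.getElem_range]
    rw [List.take_one, List.head?_drop]
    simp only [List.length_map, List.length_range] at h1
    rw [List.getElem?_eq_getElem (by omega)]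
    simp [str_join_singleton]

theorem chars_join_append_last (sep y : List Char) (l : List (List Char)) (h : l ≠ []) :
    PySem.Chars.join sep (l ++ [y]) = PySem.Chars.join sep l ++ sep ++ y := by
  induction l with
  | nil => exact absurd rfl h
  | cons a rest ih =>
      cases rest with
      | nil => simp [PySem.Chars.join_cons_cons, PySem.Chars.join_singleton]
      | cons b r =>
          simp only [List.cons_append] at ih ⊢
          rw [PySem.Chars.join_cons_cons, ih (by simp), PySem.Chars.join_cons_cons]
          simp [List.append_assoc]

theorem join_append_last (l : List String) (y : String) (h : l ≠ []) :
    PySem.Str.join " " (l ++ [y]) = PySem.Str.join " " [PySem.Str.join " " l, y] := by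
  apply String.toList_inj.mp
  rw [PySem.Str.toList_join, PySem.Str.toList_join]
  simp only [List.map_append, List.map_cons, List.map_nil, PySem.Str.toList_join]
  rw [chars_join_append_last _ _ _ (by simpa using h),
      PySem.Chars.join_cons_cons, PySem.Chars.join_singleton]

theorem nextLevel_lvl (ws : List String) (m : Nat) (hm : 1 ≤ m) :
    nextLevel ws (lvl ws m) ((m : Int) + 1) = lvl ws (m + 1) := by
  unfold nextLevel
  rw [PySem.List.pyRange_one]
  have hlen : (((ws.length:Int) - ((m:Int)+1) + 1) - 0).toNat = ws.length + 1 - (m+1) := by omega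
  rw [hlen]
  unfold lvl
  rw [List.map_map]
  apply List.map_congr_left
  intro k hk
  simp only [List.mem_range] at hk
  have hk' : k + m < ws.length := by omega
  have hm' : m ≤ ws.length := by omega
  simp only [Function.comp, zero_add]
  have e1 : PySem.List.pyGetD (lvl ws m) (k:Int) "" = PySem.Str.join " " ((ws.drop k).take m) := by
    rw [PySem.List.pyGetD_natCast]
    rw [List.getD_eq_getElem _ _ (by simp [lvl]; omega)]
    simp [lvl]
  unfold lvl at e1
  have e2 : PySem.List.pyGetD ws ((k:Int) + ((m:Int)+1) - 1) "" = ws[k + m] := by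
    have : (k:Int) + ((m:Int)+1) - 1 = ((k + m : Nat) : Int) := by push_cast; ring
    rw [this, PySem.List.pyGetD_natCast, List.getD_eq_getElem _ _ hk']
  rw [e1, e2]
  have htake : (ws.drop k).take (m+1) = (ws.drop k).take m ++ [ws[k+m]] := by
    rw [List.take_add_one]
    congr 1
    rw [List.getElem?_drop, List.getElem?_eq_getElem (by omega)]
    rfl
  rw [htake, join_append_last _ _ (by
    have : ((ws.drop k).take m).length = m := by simp; omega
    intro hnil; rw [hnil] at this; simp at this; omega)]

theorem per_sentence (ws : List String) (acc : List String) :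
    (PySem.List.pyRange 0 4 1).foldl (fun b i => b ++ shingleA ws (i + 1)) acc
      = ((PySem.List.pyRange 2 5 1).foldl
          (fun (st : List String × List String) n =>
            let cur := nextLevel ws st.1 n
            (cur, st.2 ++ cur))
          (ws, acc ++ ws)).2 := by
  have r1 : PySem.List.pyRange 0 4 1 = [0, 1, 2, 3] := by decide
  have r2 : PySem.List.pyRange 2 5 1 = [2, 3, 4] := by decide
  rw [r1, r2]
  simp only [List.foldl_cons, List.foldl_nil]
  norm_num
  have h1 : shingleA ws 1 = lvl ws 1 := by simpa using shingleA_eq_lvl ws 1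
  have h2 : shingleA ws 2 = lvl ws 2 := by simpa using shingleA_eq_lvl ws 2
  have h3 : shingleA ws 3 = lvl ws 3 := by simpa using shingleA_eq_lvl ws 3
  have h4 : shingleA ws 4 = lvl ws 4 := by simpa using shingleA_eq_lvl ws 4
  have l2 : nextLevel ws ws 2 = lvl ws 2 := by
    have := nextLevel_lvl ws 1 le_rfl
    rw [lvl_one] at this
    simpa using this
  have l3 : nextLevel ws (lvl ws 2) 3 = lvl ws 3 := by
    simpa using nextLevel_lvl ws 2 (by norm_num)
  have l4 : nextLevel ws (lvl ws 3) 4 = lvl ws 4 := by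
    simpa using nextLevel_lvl ws 3 (by norm_num)
  rw [h1, h2, h3, h4, l2, l3, l4, lvl_one]

-- ===== VERDICT (by name: the statement is the Claim_ definition above) =====
theorem bundle_listing_spec : Claim_equal_bundle_listing := by
  intro conv_ls _
  unfold Spec_bundle_listing bundle_listing bundle_listing_alt
  simp only [per_sentence]
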